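-- pv_equiv track=rewrite | github.com/Lunderberg/advent-of-code-2019 | python/d22.py | repeat_command
-- ===== SOURCE A (Python) =====
-- def repeat_command(command, deck_size, num_repeats):
--     mul,add = command
--
--     cum_mul = 1
--     cum_add = 0
--     as_binary = bin(num_repeats)[2:]
--     for i,digit in enumerate(reversed(as_binary)):
--         #If bit is non-zero, add it in
--         if digit=='1':
--             cum_mul *= mul
--             cum_add *= mul
--             cum_add += add
--             cum_mul %= deck_size
--             cum_add %= deck_size
--
--
--         # Square the operator
--         # y = m*(m*x + b) + b
--         # y = (m*m)*x + m*b + b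
--         add = (mul+1)*add
--         add %= deck_size
--         mul = mul*mul
--         mul %= deck_size
--
--     return cum_mul, cum_add
-- ===== SOURCE B (Python) =====
-- def repeat_command(command, deck_size, num_repeats):
--     def compose(f, g):
--         # affine map g applied after affine map f, reduced mod deck_size
--         m1, b1 = f
--         m2, b2 = g
--         return ((m2 * m1) % deck_size, (m2 * b1 + b2) % deck_size)
--
--     def power(n):
--         if n == 0:
--             return (1, 0)
--         h = power(n // 2)
--         sq = compose(h, h)
--         return compose(sq, command) if n % 2 == 1 else sq
--
--     return power(num_repeats)
-- ===== Notes on version B (the rewrite author's own statement) =====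
-- stated objective: alternative
-- what changed: Replaces A's explicit loop over the characters of bin(num_repeats)[2:] (iterative binary exponentiation with four mutable state variables) by a divide-and-conquer halving recursion with a single affine-composition helper; Pre_ excludes deck_size = 0, where A raises ZeroDivisionError, and negative num_repeats, where A's value (that of |num_repeats| repeats, an accident of slicing the '-0b' prefix) is not a specified repeat count and B's halving recursion does not terminate (RecursionError).
-- outside the precondition, e.g. on repeat_command((3, 4), 7, -2): A returns (2, 2), B raises RecursionError
import Mathlib
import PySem

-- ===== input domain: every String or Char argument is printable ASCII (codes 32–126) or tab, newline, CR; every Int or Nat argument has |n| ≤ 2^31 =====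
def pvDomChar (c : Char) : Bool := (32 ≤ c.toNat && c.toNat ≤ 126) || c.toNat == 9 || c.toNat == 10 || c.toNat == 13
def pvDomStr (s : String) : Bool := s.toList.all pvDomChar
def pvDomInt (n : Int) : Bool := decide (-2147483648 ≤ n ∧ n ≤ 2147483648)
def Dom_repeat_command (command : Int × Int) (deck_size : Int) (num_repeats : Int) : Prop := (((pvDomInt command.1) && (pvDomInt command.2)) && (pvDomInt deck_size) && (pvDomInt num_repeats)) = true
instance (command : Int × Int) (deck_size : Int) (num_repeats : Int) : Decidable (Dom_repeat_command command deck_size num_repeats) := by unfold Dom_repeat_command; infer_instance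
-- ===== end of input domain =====

-- B replaces A's explicit LSB-first bit-string loop by divide-and-conquer halving recursion on the
-- exponent (same O(log n) cost; objective: alternative decomposition). Equivalence is proved on
-- deck_size ≠ 0 and num_repeats ≥ 0.

-- ===== PORT A =====
-- the for-loop over the characters of bin(num_repeats)[2:] reversed, with state (mul, add, cum_mul, cum_add)
def pvLoopA (ds : Int) : List Char → Int → Int → Int → Int → Int × Int
  | [], _mul, _add, cum_mul, cum_add => (cum_mul, cum_add)
  | d :: rest, mul, add, cum_mul, cum_add =>
    -- if digit=='1': cum_mul *= mul; cum_add *= mul; cum_add += add; cum_mul %= ds; cum_add %= ds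
    let cum_mul' := if d = '1' then PySem.Int.mod (cum_mul * mul) ds else cum_mul
    let cum_add' := if d = '1' then PySem.Int.mod (cum_add * mul + add) ds else cum_add
    -- add = (mul+1)*add % ds; mul = mul*mul % ds
    pvLoopA ds rest (PySem.Int.mod (mul * mul) ds) (PySem.Int.mod ((mul + 1) * add) ds) cum_mul' cum_add'

def repeat_command (command : Int × Int) (deck_size : Int) (num_repeats : Int) : Int × Int :=
  -- bin(num_repeats)[2:] : PySem.Int.toBinChars0b is bin() as a char list, sliced with PySem.List.slice
  let as_binary := PySem.List.slice (PySem.Int.toBinChars0b num_repeats) (some 2)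
  pvLoopA deck_size as_binary.reverse command.1 command.2 1 0

-- ===== PORT B =====
def pvCompose (ds : Int) (f g : Int × Int) : Int × Int :=
  (PySem.Int.mod (g.1 * f.1) ds, PySem.Int.mod (g.1 * f.2 + g.2) ds)

-- Python's power(n); base case is n == 0, the 'n ≤ 0' guard only totalises the inputs
-- (negative n) on which the Python recursion does not terminate — they lie outside Pre_.
def pvPower (ds : Int) (c : Int × Int) (n : Int) : Int × Int :=
  if n ≤ 0 then (1, 0)
  else
    let h := pvPower ds c (PySem.Int.floordiv n 2)
    let sq := pvCompose ds h h
    if PySem.Int.mod n 2 = 1 then pvCompose ds sq c else sq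
termination_by n.toNat
decreasing_by
  rename_i hn
  rw [PySem.Int.floordiv_eq_ediv_of_pos (by omega)]
  omega

def repeat_command_alt (command : Int × Int) (deck_size : Int) (num_repeats : Int) : Int × Int :=
  pvPower deck_size command num_repeats

-- ===== PRECONDITION & SPEC =====
-- Pre_ excludes deck_size = 0, where A raises ZeroDivisionError, and negative num_repeats,
-- where A's returned value (that of repeating |num_repeats| times, an artefact of slicing the
-- '-0b' prefix of bin()) is accidental and B's halving recursion does not terminate
-- (RecursionError).
def Pre_repeat_command (command : Int × Int) (deck_size : Int) (num_repeats : Int) : Prop :=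
  deck_size ≠ 0 ∧ 0 ≤ num_repeats
instance (command : Int × Int) (deck_size : Int) (num_repeats : Int) : Decidable (Pre_repeat_command command deck_size num_repeats) := by unfold Pre_repeat_command; infer_instance

def pvWitness_repeat_command : (Int × Int) × Int × Int := ((3, 4), 7, 2)

def Spec_repeat_command (command : Int × Int) (deck_size : Int) (num_repeats : Int) (out : Int × Int) : Prop := out = repeat_command_alt command deck_size num_repeats
instance (command : Int × Int) (deck_size : Int) (num_repeats : Int) (out : Int × Int) : Decidable (Spec_repeat_command command deck_size num_repeats out) := by unfold Spec_repeat_command; infer_instance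

-- ===== CLAIM (what is proved, stated in full; the proofs are below) =====
def Claim_equal_repeat_command : Prop := ∀ (command : Int × Int) (deck_size : Int) (num_repeats : Int), Dom_repeat_command command deck_size num_repeats → Pre_repeat_command command deck_size num_repeats → Spec_repeat_command command deck_size num_repeats (repeat_command command deck_size num_repeats)

-- ===== LEMMAS AND PROOFS =====

-- LSB-first binary digits of n (empty for 0)
def pvLsb (n : Nat) : List Char :=
  if n = 0 then [] else Nat.digitChar (n % 2) :: pvLsb (n / 2)
decreasing_by omega

-- composition of affine maps over ℤ (no reduction): pvComp f g = "g after f"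
def pvComp (f g : Int × Int) : Int × Int := (g.1 * f.1, g.1 * f.2 + g.2)

def pvPow (c : Int × Int) : Nat → Int × Int
  | 0 => (1, 0)
  | n + 1 => pvComp (pvPow c n) c

def pvModP (d : Int) (x : Int × Int) : Int × Int := (PySem.Int.mod x.1 d, PySem.Int.mod x.2 d)

def pvCong (d : Int) (x y : Int × Int) : Prop := x.1 ≡ y.1 [ZMOD d] ∧ x.2 ≡ y.2 [ZMOD d]

lemma pv_cong_refl (d : Int) (x : Int × Int) : pvCong d x x := ⟨Int.ModEq.refl _, Int.ModEq.refl _⟩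

lemma pv_fmod_modeq (d a : Int) : PySem.Int.mod a d ≡ a [ZMOD d] := by
  show PySem.Int.mod a d % d = a % d
  simp only [PySem.Int.mod, Int.fmod_eq_emod]
  split_ifs
  · simp [Int.emod_emod_of_dvd _ dvd_rfl]
  · rw [Int.add_emod_right, Int.emod_emod_of_dvd _ dvd_rfl]

lemma pv_fmod_congr {d a b : Int} (h : a ≡ b [ZMOD d]) : PySem.Int.mod a d = PySem.Int.mod b d := by
  have hd : (d ∣ a) ↔ (d ∣ b) := by
    rw [Int.dvd_iff_emod_eq_zero, Int.dvd_iff_emod_eq_zero, Int.ModEq] at *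
    rw [h]
  have h' : a % d = b % d := h
  simp only [PySem.Int.mod, Int.fmod_eq_emod, h', hd]

lemma pv_modp_eq_of_cong {d : Int} {x y : Int × Int} (h : pvCong d x y) :
    pvModP d x = pvModP d y := by
  unfold pvModP
  rw [pv_fmod_congr h.1, pv_fmod_congr h.2]

lemma pv_cong_modp (d : Int) (x : Int × Int) : pvCong d (pvModP d x) x :=
  ⟨pv_fmod_modeq d x.1, pv_fmod_modeq d x.2⟩

lemma pv_comp_cong {d : Int} {f f' g g' : Int × Int} (hf : pvCong d f f') (hg : pvCong d g g') :
    pvCong d (pvComp f g) (pvComp f' g') :=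
  ⟨hg.1.mul hf.1, (hg.1.mul hf.2).add hg.2⟩

lemma pv_pow_cong {d : Int} {c c' : Int × Int} (h : pvCong d c c') :
    ∀ n, pvCong d (pvPow c n) (pvPow c' n) := by
  intro n
  induction n with
  | zero => exact pv_cong_refl d _
  | succ n ih => exact pv_comp_cong ih h

lemma pv_comp_assoc (f g h : Int × Int) : pvComp (pvComp f g) h = pvComp f (pvComp g h) := by
  unfold pvComp
  exact Prod.ext (by ring) (by ring)

lemma pv_comp_one_left (x : Int × Int) : pvComp (1, 0) x = x := by
  unfold pvComp; simp

lemma pv_comp_one_right (x : Int × Int) : pvComp x (1, 0) = x := by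
  unfold pvComp; simp

lemma pv_pow_one (c : Int × Int) : pvPow c 1 = c := by
  show pvComp (1, 0) c = c
  exact pv_comp_one_left c

lemma pv_pow_add (c : Int × Int) (m n : Nat) :
    pvPow c (m + n) = pvComp (pvPow c m) (pvPow c n) := by
  induction n with
  | zero => simp [pvPow, pv_comp_one_right]
  | succ n ih =>
    show pvPow c (m + n + 1) = _
    show pvComp (pvPow c (m + n)) c = _
    rw [ih, pv_comp_assoc]
    rfl

lemma pv_pow_sq (c : Int × Int) (k : Nat) : pvPow (pvComp c c) k = pvPow c (2 * k) := by
  induction k with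
  | zero => rfl
  | succ k ih =>
    have h2 : pvPow c 2 = pvComp c c := by
      rw [show pvPow c 2 = pvComp (pvPow c 1) c from rfl, pv_pow_one]
    show pvComp (pvPow (pvComp c c) k) (pvComp c c) = _
    rw [ih, ← h2, ← pv_pow_add, show 2 * k + 2 = 2 * (k + 1) from by omega]

-- characterisation of Nat.toDigits 2
lemma pv_toDigitsCore_eq (fuel : Nat) : ∀ (n : Nat) (ds : List Char), n < fuel →
    Nat.toDigitsCore 2 fuel n ds = (Nat.digitChar (n % 2) :: pvLsb (n / 2)).reverse ++ ds := by
  induction fuel with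
  | zero => intro n ds h; omega
  | succ f ih =>
    intro n ds _h
    show (if n / 2 = 0 then Nat.digitChar (n % 2) :: ds
          else Nat.toDigitsCore 2 f (n / 2) (Nat.digitChar (n % 2) :: ds)) = _
    by_cases h2 : n / 2 = 0
    · rw [if_pos h2, h2]
      simp [pvLsb]
    · rw [if_neg h2, ih (n / 2) _ (by omega)]
      rw [show pvLsb (n / 2) = Nat.digitChar (n / 2 % 2) :: pvLsb (n / 2 / 2) from by
        rw [pvLsb]; rw [if_neg h2]]
      simp

lemma pv_toDigits_reverse (n : Nat) (hn : n ≠ 0) :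
    (Nat.toDigits 2 n).reverse = pvLsb n := by
  show (Nat.toDigitsCore 2 (n + 1) n []).reverse = pvLsb n
  rw [pv_toDigitsCore_eq (n + 1) n [] (by omega)]
  rw [show pvLsb n = Nat.digitChar (n % 2) :: pvLsb (n / 2) from by rw [pvLsb]; rw [if_neg hn]]
  simp

-- pvCompose is composition followed by reduction
lemma pv_compose_eq (ds : Int) (f g : Int × Int) : pvCompose ds f g = pvModP ds (pvComp f g) := rfl

lemma pv_pow_succ_left (c : Int × Int) (m : Nat) : pvComp c (pvPow c m) = pvPow c (m + 1) := by
  rw [show m + 1 = 1 + m from by omega, pv_pow_add, pv_pow_one]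

-- B's recursion computes the reduced n-th power
lemma pv_powerB_eq (ds : Int) (c : Int × Int) :
    ∀ n : Nat, 0 < n → pvPower ds c (n : Int) = pvModP ds (pvPow c n) := by
  intro n
  induction n using Nat.strong_induction_on with
  | _ n ih =>
    intro hn
    have hdiv : PySem.Int.floordiv (n : Int) 2 = ((n / 2 : Nat) : Int) := by
      exact_mod_cast PySem.Int.floordiv_natCast n 2
    have hmod : PySem.Int.mod (n : Int) 2 = ((n % 2 : Nat) : Int) := by
      exact_mod_cast PySem.Int.mod_natCast n 2
    rw [pvPower]
    simp only [hdiv, hmod, if_neg (show ¬((n : Int) ≤ 0) by omega)]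
    have hcong : pvCong ds (pvPower ds c ((n / 2 : Nat) : Int)) (pvPow c (n / 2)) := by
      by_cases hk : n / 2 = 0
      · simp only [hk, Nat.cast_zero]
        rw [pvPower, if_pos (by norm_num)]
        exact pv_cong_refl ds _
      · rw [ih (n / 2) (by omega) (by omega)]
        exact pv_cong_modp ds _
    have hsq : pvCompose ds (pvPower ds c ((n / 2 : Nat) : Int)) (pvPower ds c ((n / 2 : Nat) : Int))
        = pvModP ds (pvPow c (n / 2 + n / 2)) := by
      rw [pv_compose_eq, pv_modp_eq_of_cong (pv_comp_cong hcong hcong), ← pv_pow_add]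
    by_cases hodd : n % 2 = 1
    · rw [if_pos (show ((n % 2 : Nat) : Int) = 1 by omega), hsq, pv_compose_eq,
        pv_modp_eq_of_cong (pv_comp_cong (pv_cong_modp ds _) (pv_cong_refl ds c)),
        show pvComp (pvPow c (n / 2 + n / 2)) c = pvPow c (n / 2 + n / 2 + 1) from rfl,
        show n / 2 + n / 2 + 1 = n from by omega]
    · rw [if_neg (show ¬((n % 2 : Nat) : Int) = 1 by omega), hsq,
        show n / 2 + n / 2 = n from by omega]

lemma pv_lsb_zero : pvLsb 0 = [] := by rw [pvLsb]; rfl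

lemma pv_lsb_pos {n : Nat} (hn : n ≠ 0) :
    pvLsb n = Nat.digitChar (n % 2) :: pvLsb (n / 2) := by
  rw [pvLsb, if_neg hn]

-- A's loop computes acc composed with the reduced n-th power
lemma pv_loopA_eq (ds : Int) :
    ∀ n : Nat, 0 < n → ∀ mul add cm ca : Int,
      pvLoopA ds (pvLsb n) mul add cm ca =
        pvModP ds (pvComp (cm, ca) (pvPow (mul, add) n)) := by
  intro n
  induction n using Nat.strong_induction_on with
  | _ n ih =>
    intro hn mul add cm ca
    rw [pv_lsb_pos (by omega)]
    by_cases hk : n / 2 = 0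
    · have hn1 : n = 1 := by omega
      subst hn1
      norm_num [pvLoopA, pv_lsb_zero, pv_pow_one, pvModP, pvComp,
        show Nat.digitChar 1 = '1' from rfl]
      rw [mul_comm cm mul, mul_comm ca mul]
      exact ⟨rfl, rfl⟩
    · have step : pvLoopA ds (Nat.digitChar (n % 2) :: pvLsb (n / 2)) mul add cm ca =
          pvLoopA ds (pvLsb (n / 2)) (PySem.Int.mod (mul * mul) ds)
            (PySem.Int.mod ((mul + 1) * add) ds)
            (if Nat.digitChar (n % 2) = '1' then PySem.Int.mod (cm * mul) ds else cm)
            (if Nat.digitChar (n % 2) = '1' then PySem.Int.mod (ca * mul + add) ds else ca) := by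
        rw [pvLoopA]
      rw [step, ih (n / 2) (by omega) (by omega)]
      have hsqc : pvCong ds (PySem.Int.mod (mul * mul) ds, PySem.Int.mod ((mul + 1) * add) ds)
          (pvComp (mul, add) (mul, add)) := by
        constructor
        · exact pv_fmod_modeq ds _
        · show PySem.Int.mod ((mul + 1) * add) ds ≡ mul * add + add [ZMOD ds]
          rw [show mul * add + add = (mul + 1) * add from by ring]
          exact pv_fmod_modeq ds _
      have hpows : pvCong ds (pvPow (PySem.Int.mod (mul * mul) ds, PySem.Int.mod ((mul + 1) * add) ds) (n / 2))
          (pvPow (mul, add) (2 * (n / 2))) := by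
        rw [← pv_pow_sq]
        exact pv_pow_cong hsqc (n / 2)
      rcases Nat.mod_two_eq_zero_or_one n with he | ho
      · simp only [he, if_neg (show ¬(Nat.digitChar 0 = '1') from by decide)]
        rw [pv_modp_eq_of_cong (pv_comp_cong (pv_cong_refl ds (cm, ca)) hpows),
          show 2 * (n / 2) = n from by omega]
      · simp only [ho, if_pos (show Nat.digitChar 1 = '1' from rfl)]
        have hcacc : pvCong ds (PySem.Int.mod (cm * mul) ds, PySem.Int.mod (ca * mul + add) ds)
            (pvComp (cm, ca) (mul, add)) := by
          constructor
          · show PySem.Int.mod (cm * mul) ds ≡ mul * cm [ZMOD ds]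
            rw [mul_comm mul cm]; exact pv_fmod_modeq ds _
          · show PySem.Int.mod (ca * mul + add) ds ≡ mul * ca + add [ZMOD ds]
            rw [mul_comm mul ca]; exact pv_fmod_modeq ds _
        rw [pv_modp_eq_of_cong (pv_comp_cong hcacc hpows), pv_comp_assoc, pv_pow_succ_left,
          show 2 * (n / 2) + 1 = n from by omega]

-- ===== VERDICT (by name: the statement is the Claim_ definition above) =====
theorem repeat_command_spec : Claim_equal_repeat_command := by
  intro command deck_size num_repeats _ hpre
  obtain ⟨hds, hn⟩ := hpre
  unfold Spec_repeat_command repeat_command repeat_command_alt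
  lift num_repeats to Nat using hn with m
  by_cases hm : m = 0
  · subst hm
    rw [pvPower, if_pos (by norm_num)]
    have h0 : (PySem.List.slice (PySem.Int.toBinChars0b (0 : Int)) (some 2)).reverse = ['0'] := by
      decide
    simp only [Nat.cast_zero, h0, pvLoopA, if_neg (show ¬('0' : Char) = '1' from by decide)]
  · have hbin : PySem.Int.toBinChars0b ((m : Nat) : Int) = '0' :: 'b' :: Nat.toDigits 2 m := by
      simp [PySem.Int.toBinChars0b, show ¬(((m : Nat) : Int) < 0) from by omega]
    rw [hbin]
    rw [PySem.List.slice_from _ (show (0 : Int) ≤ 2 from by norm_num)]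
    simp only [show Int.toNat 2 = 2 from rfl, List.drop_succ_cons, List.drop_zero]
    rw [pv_toDigits_reverse m hm,
      pv_loopA_eq deck_size m (by omega) command.1 command.2 1 0,
      pv_comp_one_left,
      pv_powerB_eq deck_size command m (by omega)]
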